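-- pv_equiv track=rewrite | github.com/codermore/PythonEjercicios | TP39.py | reemplazar
-- ===== SOURCE A (Python) =====
-- def reemplazar(palabra,caracter,num):
--     vocales = " "
--     reemplazo = ""
--     x= 0
--     for letra in palabra:
--         if x<num:
--             if letra not in vocales:
--                 reemplazo += letra
--             else:
--                 reemplazo += caracter
--                 x+=1
--         else:
--             reemplazo += letra
--     return reemplazo
-- ===== SOURCE B (Python) =====
-- def reemplazar(palabra, caracter, num):
--     # Phase 1: find the cutoff index just past the num-th space (len if fewer).
--     cut = 0
--     remaining = num
--     for ch in palabra:
--         if remaining <= 0: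
--             break
--         cut += 1
--         if ch == ' ':
--             remaining -= 1
--     # Phase 2: replace every space in the prefix, keep the suffix untouched.
--     return ''.join(caracter if ch == ' ' else ch for ch in palabra[:cut]) + palabra[cut:]
-- ===== Notes on version B (the rewrite author's own statement) =====
-- stated objective: alternative
-- what changed: Instead of one stateful loop that rebuilds the whole string while counting replacements, B first computes the cutoff index just past the num-th space, then replaces spaces only in that prefix and concatenates the untouched suffix.
import Mathlib
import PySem

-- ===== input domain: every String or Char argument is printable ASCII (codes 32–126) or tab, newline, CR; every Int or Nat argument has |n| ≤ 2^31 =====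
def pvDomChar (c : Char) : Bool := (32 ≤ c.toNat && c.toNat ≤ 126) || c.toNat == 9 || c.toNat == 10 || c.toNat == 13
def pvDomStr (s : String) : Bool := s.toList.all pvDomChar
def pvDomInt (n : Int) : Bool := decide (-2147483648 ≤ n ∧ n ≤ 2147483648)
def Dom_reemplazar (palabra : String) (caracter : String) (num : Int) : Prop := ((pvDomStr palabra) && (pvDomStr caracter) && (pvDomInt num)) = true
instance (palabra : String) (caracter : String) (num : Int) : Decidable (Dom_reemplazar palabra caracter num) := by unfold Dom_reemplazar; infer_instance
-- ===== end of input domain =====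

-- B computes a cutoff index just past the num-th space, then replaces spaces only in that
-- prefix and appends the untouched suffix (alternative decomposition; no speed claim).


-- ===== PORT A =====
-- A's for-loop over the characters, state x (spaces replaced so far); vocales = " " is the
-- single character ' ', so `letra not in vocales` is `letra ∉ [' ']`.
def pvLoopA (caracter : List Char) (num : Int) : List Char → Int → List Char
  | [], _ => []
  | letra :: rest, x =>
    if x < num then
      if letra ∉ [' '] then letra :: pvLoopA caracter num rest x
      else caracter ++ pvLoopA caracter num rest (x + 1)
    else letra :: pvLoopA caracter num rest x

def reemplazar (palabra : String) (caracter : String) (num : Int) : String :=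
  String.ofList (pvLoopA caracter.toList num palabra.toList 0)

-- ===== PORT B =====
-- cutoff loop of Source B: index just past the num-th space (0 if num ≤ 0, length if fewer spaces)
def pvCut : List Char → Int → Nat
  | [], _ => 0
  | ch :: rest, remaining =>
    if remaining ≤ 0 then 0
    else 1 + pvCut rest (if ch = ' ' then remaining - 1 else remaining)

def reemplazar_alt (palabra : String) (caracter : String) (num : Int) : String :=
  let cs := palabra.toList
  let cut := pvCut cs num
  String.ofList
    ((cs.take cut).flatMap (fun ch => if ch = ' ' then caracter.toList else [ch])
      ++ cs.drop cut)

-- ===== PRECONDITION & SPEC =====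
def Spec_reemplazar (palabra : String) (caracter : String) (num : Int) (out : String) : Prop := out = reemplazar_alt palabra caracter num
instance (palabra : String) (caracter : String) (num : Int) (out : String) : Decidable (Spec_reemplazar palabra caracter num out) := by unfold Spec_reemplazar; infer_instance

-- ===== CLAIM (what is proved, stated in full; the proofs are below) =====
def Claim_equal_reemplazar : Prop := ∀ (palabra : String) (caracter : String) (num : Int), Dom_reemplazar palabra caracter num → Spec_reemplazar palabra caracter num (reemplazar palabra caracter num)

-- ===== LEMMAS AND PROOFS =====
lemma pvCut_nonpos (cs : List Char) (num : Int) (h : num ≤ 0) : pvCut cs num = 0 := by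
  cases cs <;> simp [pvCut, h]

lemma loopA_eq (car : List Char) (cs : List Char) :
    ∀ (num x : Int),
      pvLoopA car num cs x =
        ((cs.take (pvCut cs (num - x))).flatMap
            (fun ch => if ch = ' ' then car else [ch]))
          ++ cs.drop (pvCut cs (num - x)) := by
  induction cs with
  | nil => intro num x; simp [pvLoopA, pvCut]
  | cons c rest ih =>
    intro num x
    by_cases h : x < num
    · have hpos : ¬ num - x ≤ 0 := by omega
      by_cases hc : c = ' '
      · have harith : num - (x + 1) = num - x - 1 := by ring
        simp only [pvLoopA, pvCut, h, hc, hpos, if_true, if_false, List.mem_singleton,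
          not_true, ih num (x + 1), harith, Nat.add_comm 1, List.take_succ_cons,
          List.drop_succ_cons, List.flatMap_cons, List.append_assoc]
      · simp only [pvLoopA, pvCut, h, hc, hpos, ite_true, ite_false,
          ih num x, Nat.add_comm 1, List.take_succ_cons, List.drop_succ_cons,
          List.flatMap_cons, List.append_assoc]
        simp [hc]
    · have h0 : num - x ≤ 0 := by omega
      simp [pvLoopA, h, pvCut_nonpos _ _ h0, ih num x]

-- ===== VERDICT (by name: the statement is the Claim_ definition above) =====
theorem reemplazar_spec : Claim_equal_reemplazar := by
  intro palabra caracter num _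
  unfold Spec_reemplazar reemplazar reemplazar_alt
  rw [loopA_eq]
  simp
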